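-- pv_equiv track=rewrite | github.com/Profe-Jose-Burgos/G90 | automatizacion_final.py | Shipping_delay
-- ===== SOURCE A (Python) =====
-- def time_separation(time_format):
--   hours=[]
--   minutes=[]
--   for i in time_format:
--     i=str(i)
--     i=i.replace(":","").replace(".0","")
--     if len(i)==3 or len(i)==4:
--       ho=i[:-2]
--       mi=i[-2:]
--       hours.append(ho)
--       minutes.append(mi)
--   return hours,minutes
--
-- def Shipping_delay(ast,pst):
--   time_de=[]
--   h1,m1=time_separation(ast)
--   h2,m2=time_separation(pst)
--   for x1,y1,x2,y2 in zip(h1,m1,h2,m2):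
--     h3=60*(int(x1)-int(x2))
--     time_de.append((h3+int(y1))-int(y2))
--   return time_de
-- ===== SOURCE B (Python) =====
-- def _next_kept(times, i):
--     """Advance cursor i to the next entry whose normalized text has length 3 or 4;
--     return (index, normalized_text), or (len(times), None) if none remains."""
--     while i < len(times):
--         s = str(times[i]).replace(":", "").replace(".0", "")
--         if len(s) == 3 or len(s) == 4:
--             return i, s
--         i += 1
--     return i, None
--
-- def Shipping_delay(ast, pst):
--     out = []
--     i = j = 0
--     while True:
--         i, sa = _next_kept(ast, i)
--         j, sb = _next_kept(pst, j)
--         if sa is None or sb is None: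
--             return out
--         out.append((60 * int(sa[:-2]) + int(sa[-2:]))
--                    - (60 * int(sb[:-2]) + int(sb[-2:])))
--         i += 1
--         j += 1
-- ===== Notes on version B (the rewrite author's own statement) =====
-- stated objective: alternative
-- what changed: Replaces A's staged design (a helper that filters every entry into two parallel hour/minute string lists, then a four-way zip loop doing the arithmetic) by a lazy two-pointer scan: two cursors advance independently to each list's next valid entry and the minute difference is emitted immediately, building no intermediate lists and stopping as soon as either cursor runs out.
import Mathlib
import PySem

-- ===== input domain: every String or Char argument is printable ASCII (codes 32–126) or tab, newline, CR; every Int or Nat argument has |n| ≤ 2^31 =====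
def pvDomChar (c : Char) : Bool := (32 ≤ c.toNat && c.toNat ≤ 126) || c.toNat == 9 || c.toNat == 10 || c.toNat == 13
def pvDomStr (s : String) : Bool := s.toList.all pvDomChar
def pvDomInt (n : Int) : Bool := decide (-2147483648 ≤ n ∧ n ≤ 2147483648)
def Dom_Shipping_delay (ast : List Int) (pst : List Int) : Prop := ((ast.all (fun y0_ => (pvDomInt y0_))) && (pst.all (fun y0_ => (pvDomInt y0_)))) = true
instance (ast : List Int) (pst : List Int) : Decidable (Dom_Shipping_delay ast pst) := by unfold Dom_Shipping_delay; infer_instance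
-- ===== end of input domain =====

-- B replaces A's staged filter-into-parallel-string-lists plus four-way zip by a lazy
-- two-pointer scan emitting each minute difference directly (alternative decomposition).

-- ===== PORT A =====
-- str(i).replace(":","").replace(".0","") — this exact expression appears in both sources
def pvNorm (i : Int) : List Char :=
  PySem.Chars.replace (PySem.Chars.replace (PySem.Int.toChars i) [':'] []) ['.', '0'] []

-- int(s); none (ValueError) is reachable only on inputs excluded by Pre_Shipping_delay
def pvParse (s : List Char) : Int := (PySem.Int.ofChars? s).getD 0

def time_separation (time_format : List Int) : List (List Char) × List (List Char) :=
  time_format.foldl (fun acc i =>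
    let s := pvNorm i
    if s.length = 3 ∨ s.length = 4 then
      (acc.1 ++ [PySem.List.slice s none (some (-2))],   -- ho = i[:-2]
       acc.2 ++ [PySem.List.slice s (some (-2)) none])   -- mi = i[-2:]
    else acc) ([], [])

def Shipping_delay (ast : List Int) (pst : List Int) : List Int :=
  let hm1 := time_separation ast
  let hm2 := time_separation pst
  ((hm1.1.zip hm1.2).zip (hm2.1.zip hm2.2)).foldl (fun time_de q =>
    let h3 := 60 * (pvParse q.1.1 - pvParse q.2.1)
    time_de ++ [(h3 + pvParse q.1.2) - pvParse q.2.2]) []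

-- ===== PORT B =====
-- _next_kept: advance cursor i to the next entry whose normalized text has length 3 or 4
def nextKept (times : List Int) (i : Nat) : Nat × Option (List Char) :=
  if h : i < times.length then
    let s := pvNorm times[i]
    if s.length = 3 ∨ s.length = 4 then (i, some s)
    else nextKept times (i + 1)
  else (i, none)
termination_by times.length - i

-- cited by loopB's decreasing_by (termination of the port)
theorem nextKept_lt (times : List Int) (i : Nat) (s0 : List Char)
    (h : (nextKept times i).2 = some s0) :
    i ≤ (nextKept times i).1 ∧ (nextKept times i).1 < times.length := by
  fun_induction nextKept times i with
  | case1 i hi s hk => exact ⟨le_rfl, hi⟩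
  | case2 i hi s hk ih => have := ih h; omega
  | case3 i hi => simp at h

-- the while-True loop of B
def loopB (ast pst : List Int) (i j : Nat) (out : List Int) : List Int :=
  match ha : (nextKept ast i).2, (nextKept pst j).2 with
  | some sa, some sb =>
      loopB ast pst ((nextKept ast i).1 + 1) ((nextKept pst j).1 + 1)
        (out ++ [(60 * pvParse (PySem.List.slice sa none (some (-2)))
                    + pvParse (PySem.List.slice sa (some (-2)) none))
                 - (60 * pvParse (PySem.List.slice sb none (some (-2)))
                    + pvParse (PySem.List.slice sb (some (-2)) none))])
  | _, _ => out
termination_by ast.length - i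
decreasing_by
  have := nextKept_lt ast i sa ha
  omega

def Shipping_delay_alt (ast : List Int) (pst : List Int) : List Int :=
  loopB ast pst 0 0 []

-- ===== PRECONDITION & SPEC =====
-- Pre_ excludes exactly the inputs on which A raises ValueError: an entry in [-99,-10]
-- (its text is "-dd", so the hour slice is "-" and int("-") raises) among the leading
-- kept entries that the zip actually pairs; B raises on exactly the same inputs.
def pvKeptRange (x : Int) : Bool := decide ((100 ≤ x ∧ x ≤ 9999) ∨ (-999 ≤ x ∧ x ≤ -10))

def Pre_Shipping_delay (ast : List Int) (pst : List Int) : Prop :=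
  let ka := ast.filter pvKeptRange
  let kb := pst.filter pvKeptRange
  let n := min ka.length kb.length
  (∀ x ∈ ka.take n, ¬(-99 ≤ x ∧ x ≤ -10)) ∧ (∀ x ∈ kb.take n, ¬(-99 ≤ x ∧ x ≤ -10))
instance (ast : List Int) (pst : List Int) : Decidable (Pre_Shipping_delay ast pst) := by
  unfold Pre_Shipping_delay; infer_instance

def pvWitness_Shipping_delay : List Int × List Int := ([830, 945], [815, 930])

def Spec_Shipping_delay (ast : List Int) (pst : List Int) (out : List Int) : Prop := out = Shipping_delay_alt ast pst
instance (ast : List Int) (pst : List Int) (out : List Int) : Decidable (Spec_Shipping_delay ast pst out) := by unfold Spec_Shipping_delay; infer_instance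

-- ===== CLAIM (what is proved, stated in full; the proofs are below) =====
def Claim_equal_Shipping_delay : Prop := ∀ (ast : List Int) (pst : List Int), Dom_Shipping_delay ast pst → Pre_Shipping_delay ast pst → Spec_Shipping_delay ast pst (Shipping_delay ast pst)

-- ===== LEMMAS AND PROOFS =====

def pvKeep (i : Int) : Bool := decide ((pvNorm i).length = 3 ∨ (pvNorm i).length = 4)
def pvH (i : Int) : List Char := PySem.List.slice (pvNorm i) none (some (-2))
def pvM (i : Int) : List Char := PySem.List.slice (pvNorm i) (some (-2)) none
def pvVal (i : Int) : Int := 60 * pvParse (pvH i) + pvParse (pvM i)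

lemma time_separation_eq (tf : List Int) :
    time_separation tf = ((tf.filter pvKeep).map pvH, (tf.filter pvKeep).map pvM) := by
  unfold time_separation
  suffices h : ∀ (l : List Int) (h m : List (List Char)),
      l.foldl (fun acc i =>
        let s := pvNorm i
        if s.length = 3 ∨ s.length = 4 then
          (acc.1 ++ [PySem.List.slice s none (some (-2))],
           acc.2 ++ [PySem.List.slice s (some (-2)) none])
        else acc) (h, m)
      = (h ++ (l.filter pvKeep).map pvH, m ++ (l.filter pvKeep).map pvM) by
    simpa using h tf [] []
  intro l
  induction l with
  | nil => intro h m; simp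
  | cons i l ih =>
    intro h m
    by_cases hk : (pvNorm i).length = 3 ∨ (pvNorm i).length = 4
    · simp [List.foldl_cons, hk, pvKeep, ih, pvH, pvM]
    · simp [List.foldl_cons, hk, pvKeep, ih]

lemma nextKept_none (times : List Int) (i : Nat)
    (h : (nextKept times i).2 = none) : (times.drop i).filter pvKeep = [] := by
  fun_induction nextKept times i with
  | case1 i hi s hk => simp at h
  | case2 i hi s hk ih =>
    rw [List.drop_eq_getElem_cons hi, List.filter_cons]
    have hf : pvKeep times[i] = false := by
      simp only [pvKeep, decide_eq_false_iff_not]; exact hk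
    simp [hf, ih h]
  | case3 i hi => rw [List.drop_eq_nil_of_le (by omega)]; rfl

lemma nextKept_some (times : List Int) (i : Nat) (s0 : List Char)
    (h : (nextKept times i).2 = some s0) :
    ∃ a, s0 = pvNorm a ∧
      (times.drop i).filter pvKeep = a :: (times.drop ((nextKept times i).1 + 1)).filter pvKeep := by
  fun_induction nextKept times i with
  | case1 i hi s hk =>
    refine ⟨times[i], by simpa using h.symm, ?_⟩
    rw [List.drop_eq_getElem_cons hi, List.filter_cons]
    have hf : pvKeep times[i] = true := by
      simp only [pvKeep, decide_eq_true_eq]; exact hk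
    simp [hf]
  | case2 i hi s hk ih =>
    obtain ⟨a, hs, hfa⟩ := ih h
    refine ⟨a, hs, ?_⟩
    rw [List.drop_eq_getElem_cons hi, List.filter_cons]
    have hf : pvKeep times[i] = false := by
      simp only [pvKeep, decide_eq_false_iff_not]; exact hk
    simpa [hf] using hfa
  | case3 i hi => simp at h

lemma loopB_eq (ast pst : List Int) : ∀ (i j : Nat) (out : List Int),
    loopB ast pst i j out =
      out ++ (((ast.drop i).filter pvKeep).zip ((pst.drop j).filter pvKeep)).map
        (fun p => pvVal p.1 - pvVal p.2) := by
  intro i j out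
  fun_induction loopB ast pst i j out with
  | case1 i j out sa sb ha hb ih =>
    obtain ⟨a, hsa, hfa⟩ := nextKept_some ast i sa ha
    obtain ⟨b, hsb, hfb⟩ := nextKept_some pst j sb hb
    rw [ih, hfa, hfb, hsa, hsb]
    simp only [List.zip_cons_cons, List.map_cons, pvVal, pvH, pvM, List.append_assoc,
      List.singleton_append]
  | case2 i j out h =>
    rcases ha : (nextKept ast i).2 with _ | sa
    · rw [nextKept_none ast i ha]; simp
    · rcases hb : (nextKept pst j).2 with _ | sb
      · rw [nextKept_none pst j hb]; simp
      · exact (h sa sb ha hb).elim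

-- ===== VERDICT (by name: the statement is the Claim_ definition above) =====
theorem Shipping_delay_spec : Claim_equal_Shipping_delay := by
  intro ast pst _ _
  unfold Spec_Shipping_delay
  show Shipping_delay ast pst = Shipping_delay_alt ast pst
  unfold Shipping_delay Shipping_delay_alt
  rw [time_separation_eq, time_separation_eq, loopB_eq]
  simp only [List.drop_zero, List.nil_append]
  simp only [List.zip_map', List.zip_map, PySem.List.foldl_append_singleton_eq_map, List.map_map,
    List.nil_append]
  apply List.map_congr_left
  intro q _
  simp only [Function.comp, Prod.map, pvVal, pvH, pvM]
  ring
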